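-- pv_equiv track=rewrite | github.com/lyikadmin/lyik_service | service_handlers/liveness/liveness.py | _split_digits
-- ===== SOURCE A (Python) =====
-- def _split_digits(run: str) -> list[str]:
--     """
--     Break a string of digits into the shortest sequence of numbers drawn from 1-10,
--     skipping 0 entirely.
--
--     Examples
--     --------
--     '106'      -> ['10', '6']
--     '10106'    -> ['10', '10', '6']
--     '807'      -> ['8', '7']       # '0' is discarded
--     """
--     parts: list[str] = []
--     i = 0
--     while i < len(run):
--         # Look for '10'
--         if run[i] == "1" and i + 1 < len(run) and run[i + 1] == "0":
--             parts.append("10")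
--             i += 2
--         else:
--             if run[i] != "0":  # ignore lone zeros
--                 parts.append(run[i])
--             i += 1
--     return parts
-- ===== SOURCE B (Python) =====
-- def _split_digits(run: str) -> list[str]:
--     # Stateless one-pass comprehension: every '0' is dropped (it is either the
--     # tail of a '10' emitted at the preceding '1', or a lone zero); a '1' emits
--     # '10' when the next character is '0', any other kept char emits itself.
--     return [
--         "10" if c == "1" and run[i + 1 : i + 2] == "0" else c
--         for i, c in enumerate(run)
--         if c != "0"
--     ]
-- ===== Notes on version B (the rewrite author's own statement) =====
-- stated objective: idiomatic
-- what changed: Replaced the stateful while-loop with variable index jumps (i += 1 or 2) by a single stateless filtered comprehension: every '0' is filtered out and each remaining character is mapped via a one-character lookahead, so no mutable index or skip state is needed.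
import Mathlib
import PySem

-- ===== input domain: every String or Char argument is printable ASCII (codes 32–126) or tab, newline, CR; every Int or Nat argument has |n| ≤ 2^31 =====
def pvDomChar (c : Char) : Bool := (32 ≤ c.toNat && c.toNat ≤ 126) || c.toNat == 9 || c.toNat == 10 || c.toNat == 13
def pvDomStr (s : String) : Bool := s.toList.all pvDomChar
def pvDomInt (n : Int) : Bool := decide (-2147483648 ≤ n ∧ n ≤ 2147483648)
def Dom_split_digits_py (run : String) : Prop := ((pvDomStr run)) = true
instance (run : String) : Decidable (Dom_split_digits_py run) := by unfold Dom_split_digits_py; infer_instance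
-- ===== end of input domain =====

-- B replaces A's stateful while-loop (with 1- or 2-step index jumps) by a stateless
-- filtered comprehension with a one-character lookahead; objective: idiomatic.

-- ===== PORT A =====
-- A's while loop: index i, parts accumulator; branch order as in the Python.
def pvALoop (cs : List Char) (i : Nat) (parts : List String) : List String :=
  if h : i < cs.length then
    if cs[i] = '1' ∧ i + 1 < cs.length ∧ cs[i + 1]? = some '0' then
      pvALoop cs (i + 2) (parts ++ ["10"])
    else if cs[i] ≠ '0' then
      pvALoop cs (i + 1) (parts ++ [String.ofList [cs[i]]])
    else
      pvALoop cs (i + 1) parts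
  else parts
termination_by cs.length - i

def split_digits_py (run : String) : List String := pvALoop run.toList 0 []

-- ===== PORT B =====
-- transliteration of Source B's comprehension: enumerate → filter (c != '0') → map with run[i+1:i+2]
def split_digits_py_alt (run : String) : List String :=
  ((PySem.List.enumerate run.toList 0).filter (fun p => p.2 ≠ '0')).map
    (fun p => if p.2 = '1' ∧ PySem.Str.slice run (some (p.1 + 1)) (some (p.1 + 2)) = "0"
              then "10" else String.ofList [p.2])

-- ===== PRECONDITION & SPEC =====
def Spec_split_digits_py (run : String) (out : List String) : Prop := out = split_digits_py_alt run
instance (run : String) (out : List String) : Decidable (Spec_split_digits_py run out) := by unfold Spec_split_digits_py; infer_instance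

-- ===== CLAIM (what is proved, stated in full; the proofs are below) =====
def Claim_equal_split_digits_py : Prop := ∀ (run : String), Dom_split_digits_py run → Spec_split_digits_py run (split_digits_py run)

-- ===== LEMMAS AND PROOFS =====

-- common spec shape: per-character emission with one-character lookahead
def pvG : List Char → List String
  | [] => []
  | c :: rest =>
      (if c = '0' then [] else
        [if c = '1' ∧ rest.head? = some '0' then "10" else String.ofList [c]]) ++ pvG rest

-- the lookahead slice run[i+1:i+2] == "0" is exactly "the character after i is '0'"
lemma pv_slice_char (run : String) (k : Nat) :
    (PySem.Str.slice run (some ((k : Int) + 1)) (some ((k : Int) + 2)) = "0")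
      ↔ run.toList[k + 1]? = some '0' := by
  have key : (PySem.Str.slice run (some ((k : Int) + 1)) (some ((k : Int) + 2))).toList
      = (run.toList[k + 1]?).toList := by
    rw [show ((k : Int) + 2) = (((k + 1 : Nat) : Int) + ((1 : Nat) : Int)) by push_cast; ring,
        show ((k : Int) + 1) = ((k + 1 : Nat) : Int) by push_cast; ring,
        PySem.Str.toList_slice, PySem.Chars.slice_eq_listSlice,
        PySem.List.slice_natCast_add, List.take_one, List.head?_drop]
  constructor
  · intro h
    rw [h] at key
    cases hx : run.toList[k + 1]? with
    | none => rw [hx] at key; simp at key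
    | some c => rw [hx] at key; simp at key; rw [← key]
  · intro h
    rw [← String.toList_inj, key, h]
    rfl

-- B's comprehension, from offset j, equals pvG on the suffix
lemma pvB_aux (full : List Char) : ∀ (rest : List Char) (j : Nat), rest = full.drop j →
    ((PySem.List.enumerate rest (j : Int)).filter (fun p => p.2 ≠ '0')).map
      (fun p => if p.2 = '1' ∧ full[p.1.toNat + 1]? = some '0' then "10" else String.ofList [p.2])
      = pvG rest := by
  intro rest
  induction rest with
  | nil => intro j _; simp [pvG]
  | cons c rest ih =>
    intro j hr
    have hr' : rest = full.drop (j + 1) := by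
      have := congrArg List.tail hr
      simpa [List.tail_drop] using this
    have hhead : rest.head? = full[j + 1]? := by rw [hr', List.head?_drop]
    rw [PySem.List.enumerate_cons,
        show (j : Int) + 1 = ((j + 1 : Nat) : Int) by push_cast; ring]
    by_cases h0 : c = '0'
    · subst h0
      simp only [List.filter_cons, ne_eq, not_true_eq_false, decide_false,
        if_false, Bool.false_eq_true]
      rw [ih (j + 1) hr']
      simp [pvG]
    · simp only [List.filter_cons, ne_eq, h0, not_false_eq_true, decide_true, if_true,
        List.map_cons]
      rw [ih (j + 1) hr']
      simp only [pvG, h0, if_false, Int.toNat_natCast, hhead]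
      rfl

-- A's loop appends pvG of the unprocessed suffix
lemma pvA_aux : ∀ (cs : List Char) (i : Nat) (parts : List String),
    pvALoop cs i parts = parts ++ pvG (cs.drop i)
  | cs, i, parts => by
    unfold pvALoop
    by_cases h : i < cs.length
    · simp only [dif_pos h]
      have hdrop : cs.drop i = cs[i] :: cs.drop (i + 1) := (List.getElem_cons_drop h).symm
      by_cases hc : cs[i] = '1' ∧ i + 1 < cs.length ∧ cs[i + 1]? = some '0'
      · obtain ⟨h1, hlt, h0⟩ := hc
        have h0' : cs[i + 1] = '0' := by
          rcases List.getElem?_eq_some_iff.mp h0 with ⟨_, hv⟩; exact hv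
        have hdrop2 : cs.drop (i + 1) = cs[i + 1] :: cs.drop (i + 2) :=
          (List.getElem_cons_drop hlt).symm
        rw [if_pos ⟨h1, hlt, h0⟩, pvA_aux cs (i + 2) (parts ++ ["10"]),
            hdrop, hdrop2, h1, h0']
        simp [pvG]
      · rw [if_neg hc]
        have hcond : ¬ (cs[i] = '1' ∧ (cs.drop (i + 1)).head? = some '0') := by
          rintro ⟨h1, hh⟩
          rw [List.head?_drop] at hh
          rcases List.getElem?_eq_some_iff.mp hh with ⟨hlt, _⟩
          exact hc ⟨h1, hlt, hh⟩
        by_cases hz : cs[i] ≠ '0'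
        · rw [if_pos hz, pvA_aux cs (i + 1) _, hdrop]
          simp only [pvG, hz, if_false, if_neg hcond]
          simp
        · have hz' : cs[i] = '0' := not_not.mp hz
          rw [if_neg (by simpa using hz'), pvA_aux cs (i + 1) parts, hdrop]
          simp [pvG, hz']
    · rw [dif_neg h]
      rw [List.drop_of_length_le (le_of_not_gt h)]
      simp [pvG]
  termination_by cs i _ => cs.length - i

theorem pv_main (run : String) : split_digits_py run = split_digits_py_alt run := by
  unfold split_digits_py split_digits_py_alt
  rw [pvA_aux]
  have hmap :
      ((PySem.List.enumerate run.toList 0).filter (fun p => p.2 ≠ '0')).map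
        (fun p => if p.2 = '1' ∧ PySem.Str.slice run (some (p.1 + 1)) (some (p.1 + 2)) = "0"
                  then "10" else String.ofList [p.2])
      = ((PySem.List.enumerate run.toList 0).filter (fun p => p.2 ≠ '0')).map
        (fun p => if p.2 = '1' ∧ run.toList[p.1.toNat + 1]? = some '0'
                  then "10" else String.ofList [p.2]) := by
    apply List.map_congr_left
    intro p hp
    obtain ⟨k, hk, rfl⟩ :=
      (PySem.List.mem_enumerate_iff run.toList 0 p).mp (List.mem_of_mem_filter hp)
    simp only [zero_add, Int.toNat_natCast]
    exact if_congr (and_congr_right' (pv_slice_char run k)) rfl rfl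
  rw [hmap]
  have hB := pvB_aux run.toList run.toList 0 (by simp)
  rw [show ((0 : Nat) : Int) = (0 : Int) by norm_num] at hB
  rw [hB]
  simp

-- ===== VERDICT (by name: the statement is the Claim_ definition above) =====
theorem split_digits_py_spec : Claim_equal_split_digits_py := by
  intro run _
  unfold Spec_split_digits_py
  exact pv_main run
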